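-- pv_equiv track=rewrite | github.com/Apreche/advent-of-code | 2021/01/sonar-sweep-2.py | rolling_avg_increases
-- ===== SOURCE A (Python) =====
-- def rolling_avg_increases(depths, window_size=3):
--     num_increases = 0
--     previous_window_sum = None
--     for i in range(0, len(depths)-(window_size - 1)):
--         current_window_sum = sum(depths[i:i+window_size])
--         if previous_window_sum is not None:
--             if current_window_sum > previous_window_sum:
--                 num_increases += 1
--         previous_window_sum = current_window_sum
--     return num_increases
-- ===== SOURCE B (Python) =====
-- def rolling_avg_increases(depths, window_size=3):
--     # Consecutive window sums share all but two elements, so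
--     # sum(depths[i+1:i+1+w]) > sum(depths[i:i+w])  iff  depths[i+w] > depths[i].
--     return sum(1 for i in range(len(depths) - window_size)
--                if depths[i + window_size] > depths[i])
-- ===== Notes on version B (the rewrite author's own statement) =====
-- stated objective: faster
-- what changed: Replaces the per-position re-summation of each window with a single pass comparing depths[i+window_size] against depths[i], using the fact that consecutive window sums differ only in those two elements.
-- outside the precondition, e.g. on rolling_avg_increases([1, 2, 3, 4, 5], -2): A returns 1, B raises IndexError
import Mathlib
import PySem

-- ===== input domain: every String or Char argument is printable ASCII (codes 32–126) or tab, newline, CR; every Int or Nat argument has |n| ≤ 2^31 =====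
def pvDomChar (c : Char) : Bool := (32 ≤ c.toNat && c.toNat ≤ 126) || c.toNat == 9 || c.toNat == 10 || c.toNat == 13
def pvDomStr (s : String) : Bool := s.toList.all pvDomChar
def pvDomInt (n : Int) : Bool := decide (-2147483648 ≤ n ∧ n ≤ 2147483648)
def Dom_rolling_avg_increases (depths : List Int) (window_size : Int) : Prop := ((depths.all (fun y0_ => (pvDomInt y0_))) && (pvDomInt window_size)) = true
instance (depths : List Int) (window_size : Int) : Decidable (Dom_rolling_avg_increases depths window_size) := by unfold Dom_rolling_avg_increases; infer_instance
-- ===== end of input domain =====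

-- B replaces A's O(n·w) re-summation of every window with one O(n) pass comparing
-- depths[i+window_size] with depths[i] (consecutive window sums differ in exactly those two elements).

-- ===== PORT A =====
def rolling_avg_increases (depths : List Int) (window_size : Int) : Int :=
  ((PySem.List.pyRange 0 ((depths.length : Int) - (window_size - 1)) 1).foldl
    (fun (st : Int × Option Int) i =>
      let cur := (PySem.List.slice depths (some i) (some (i + window_size))).sum
      let num := match st.2 with
        | none => st.1
        | some prev => if cur > prev then st.1 + 1 else st.1
      (num, some cur))
    (0, none)).1

-- ===== PORT B =====
def rolling_avg_increases_alt (depths : List Int) (window_size : Int) : Int :=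
  (PySem.List.pyRange 0 ((depths.length : Int) - window_size) 1).foldl
    (fun acc i =>
      if PySem.List.pyGetD depths (i + window_size) 0 > PySem.List.pyGetD depths i 0
      then acc + 1 else acc)
    0

-- ===== PRECONDITION & SPEC =====
-- Pre_ excludes negative window sizes, where A still returns a value: those inputs are outside the
-- function's natural domain, A's counts there are an artefact of Python's negative-slice clamping,
-- and B itself raises IndexError there.
def Pre_rolling_avg_increases (depths : List Int) (window_size : Int) : Prop :=
  0 ≤ window_size
instance (depths : List Int) (window_size : Int) : Decidable (Pre_rolling_avg_increases depths window_size) := by unfold Pre_rolling_avg_increases; infer_instance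

def pvWitness_rolling_avg_increases : List Int × Int := ([1, 2, 3, 4, 5], 3)

def Spec_rolling_avg_increases (depths : List Int) (window_size : Int) (out : Int) : Prop := out = rolling_avg_increases_alt depths window_size
instance (depths : List Int) (window_size : Int) (out : Int) : Decidable (Spec_rolling_avg_increases depths window_size out) := by unfold Spec_rolling_avg_increases; infer_instance

-- ===== CLAIM (what is proved, stated in full; the proofs are below) =====
def Claim_equal_rolling_avg_increases : Prop := ∀ (depths : List Int) (window_size : Int), Dom_rolling_avg_increases depths window_size → Pre_rolling_avg_increases depths window_size → Spec_rolling_avg_increases depths window_size (rolling_avg_increases depths window_size)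

-- ===== LEMMAS AND PROOFS =====

-- Window sum starting at position j (window length m).
def pvWinSum (depths : List Int) (m j : Nat) : Int := ((depths.drop j).take m).sum

-- Telescoping: consecutive full windows differ in exactly two elements.
lemma pvWinSum_tel (depths : List Int) (m j : Nat) (h1 : 1 ≤ m) (h2 : j + m < depths.length) :
    pvWinSum depths m (j + 1) + depths.getD j 0 = pvWinSum depths m j + depths.getD (j + m) 0 := by
  have hj : j < depths.length := by omega
  have hdrop : depths.drop j = depths[j] :: depths.drop (j + 1) :=
    List.drop_eq_getElem_cons hj
  have hgj : depths.getD j 0 = depths[j] := by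
    rw [List.getD_eq_getElem?_getD, List.getElem?_eq_getElem hj, Option.getD_some]
  have hgjm : depths.getD (j + m) 0 = depths[j + m] := by
    rw [List.getD_eq_getElem?_getD, List.getElem?_eq_getElem h2, Option.getD_some]
  obtain ⟨k, rfl⟩ : ∃ k, m = k + 1 := ⟨m - 1, by omega⟩
  have hSj : pvWinSum depths (k + 1) j = depths[j] + ((depths.drop (j + 1)).take k).sum := by
    unfold pvWinSum
    rw [hdrop, List.take_succ_cons, List.sum_cons]
  have hix : j + 1 + k = j + (k + 1) := by omega
  have hidx : (depths.drop (j + 1))[k]? = some depths[j + (k + 1)] := by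
    rw [List.getElem?_drop, hix, List.getElem?_eq_getElem h2]
  have hSj1 : pvWinSum depths (k + 1) (j + 1)
      = ((depths.drop (j + 1)).take k).sum + depths[j + (k + 1)] := by
    unfold pvWinSum
    rw [List.take_add_one, hidx, List.sum_append]
    simp
  rw [hSj, hSj1, hgj, hgjm]
  ring

-- A's loop over range(0, n+1): (count of increases among the n comparisons, last window sum).
lemma pvA_fold (depths : List Int) (m : Nat) (n : Nat) :
    ((PySem.List.pyRange 0 ((n : Int) + 1) 1).foldl
      (fun (st : Int × Option Int) i =>
        let cur := (PySem.List.slice depths (some i) (some (i + (m : Int)))).sum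
        let num := match st.2 with
          | none => st.1
          | some prev => if cur > prev then st.1 + 1 else st.1
        (num, some cur))
      (0, none))
    = (((List.range n).countP
          (fun j => decide (pvWinSum depths m j < pvWinSum depths m (j + 1))) : Int),
       some (pvWinSum depths m n)) := by
  induction n with
  | zero =>
    have h0 : ((0 : Nat) : Int) + 1 = (0 : Int) + 1 := by norm_num
    rw [h0, PySem.List.pyRange_one_cons (by omega), PySem.List.pyRange_one_eq_nil (by omega)]
    have hsl : PySem.List.slice depths (some (0 : Int)) (some ((0 : Int) + (m : Int)))
        = (depths.drop 0).take m := by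
      have h := PySem.List.slice_natCast_add (xs := depths) (j := 0) (n := m)
      have e1 : ((0 : Nat) : Int) = (0 : Int) := by norm_num
      rw [e1] at h
      exact h
    simp only [List.foldl_cons, List.foldl_nil, hsl]
    simp [pvWinSum]
  | succ n ih =>
    have hc2 : ((n + 1 : Nat) : Int) + 1 = ((n : Int) + 1) + 1 := by push_cast; ring
    rw [hc2, PySem.List.pyRange_one_succ_right (by omega), List.foldl_append, ih]
    have hc : ((n : Int) + 1) = ((n + 1 : Nat) : Int) := by push_cast; ring
    have hsl : PySem.List.slice depths (some ((n : Int) + 1)) (some (((n : Int) + 1) + (m : Int)))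
        = (depths.drop (n + 1)).take m := by
      rw [hc]
      exact PySem.List.slice_natCast_add (xs := depths) (j := n + 1) (n := m)
    simp only [List.foldl_cons, List.foldl_nil, hsl]
    have hcur : ((depths.drop (n + 1)).take m).sum = pvWinSum depths m (n + 1) := rfl
    rw [List.range_succ, List.countP_append]
    by_cases h : pvWinSum depths m n < pvWinSum depths m (n + 1)
    · simp only [hcur, gt_iff_lt, List.countP_cons, List.countP_nil,
        Prod.mk.injEq, h, decide_true]
      constructor
      · push_cast; ring
      · trivial
    · simp only [hcur, gt_iff_lt, List.countP_cons, List.countP_nil,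
        Prod.mk.injEq, h, decide_false]
      constructor
      · push_cast; ring
      · trivial

-- B's loop is a countP over List.range.
lemma pvB_eq_countP (depths : List Int) (m : Nat) :
    rolling_avg_increases_alt depths (m : Int)
    = (((List.range (depths.length - m)).countP
          (fun j => decide (depths.getD j 0 < depths.getD (j + m) 0))) : Int) := by
  unfold rolling_avg_increases_alt
  by_cases hmL : m ≤ depths.length
  · have hb : ((depths.length : Int) - (m : Int)) = ((depths.length - m : Nat) : Int) := by
      omega
    rw [hb, PySem.List.pyRange_zero_natCast, List.foldl_map]
    have hcongr : ∀ (acc : Int) (j : Nat), j ∈ List.range (depths.length - m) →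
        (if PySem.List.pyGetD depths ((j : Int) + (m : Int)) 0 > PySem.List.pyGetD depths (j : Int) 0
         then acc + 1 else acc)
        = (if depths.getD j 0 < depths.getD (j + m) 0 then acc + 1 else acc) := by
      intro acc j _
      have h1 : PySem.List.pyGetD depths ((j : Int) + (m : Int)) 0 = depths.getD (j + m) 0 := by
        rw [show ((j : Int) + (m : Int)) = ((j + m : Nat) : Int) by push_cast; ring]
        exact PySem.List.pyGetD_natCast ..
      have h2 : PySem.List.pyGetD depths ((j : Int)) 0 = depths.getD j 0 :=
        PySem.List.pyGetD_natCast ..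
      rw [h1, h2]
    rw [PySem.List.foldl_congr_mem _ _ _ 0 hcongr, PySem.List.foldl_ite_add_one]
    simp
  · have hB : PySem.List.pyRange 0 ((depths.length : Int) - (m : Int)) 1 = [] :=
      PySem.List.pyRange_one_eq_nil (by omega)
    have hr : depths.length - m = 0 := by omega
    rw [hB, hr]
    simp

-- The two per-position conditions agree on full windows.
lemma pvCond_eq (depths : List Int) (m j : Nat) (hjm : j + m < depths.length) :
    decide (pvWinSum depths m j < pvWinSum depths m (j + 1))
    = decide (depths.getD j 0 < depths.getD (j + m) 0) := by
  rcases Nat.eq_zero_or_pos m with hm | hm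
  · subst hm
    simp [pvWinSum]
  · have := pvWinSum_tel depths m j hm hjm
    simp only [decide_eq_decide]
    omega

theorem pv_main (depths : List Int) (window_size : Int) (hw : 0 ≤ window_size) :
    rolling_avg_increases depths window_size = rolling_avg_increases_alt depths window_size := by
  obtain ⟨m, rfl⟩ : ∃ m : Nat, window_size = (m : Int) := ⟨window_size.toNat, by omega⟩
  by_cases hmL : m ≤ depths.length
  · have hbound : ((depths.length : Int) - ((m : Int) - 1))
        = ((depths.length - m : Nat) : Int) + 1 := by omega
    unfold rolling_avg_increases
    rw [hbound, pvA_fold depths m (depths.length - m), pvB_eq_countP depths m]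
    dsimp only
    congr 1
    apply List.countP_congr
    intro j hj
    rw [List.mem_range] at hj
    rw [pvCond_eq depths m j (by omega)]
  · have hA : PySem.List.pyRange 0 ((depths.length : Int) - ((m : Int) - 1)) 1 = [] :=
      PySem.List.pyRange_one_eq_nil (by omega)
    have hB : PySem.List.pyRange 0 ((depths.length : Int) - (m : Int)) 1 = [] :=
      PySem.List.pyRange_one_eq_nil (by omega)
    unfold rolling_avg_increases rolling_avg_increases_alt
    rw [hA, hB]
    rfl

-- ===== VERDICT (by name: the statement is the Claim_ definition above) =====
theorem rolling_avg_increases_spec : Claim_equal_rolling_avg_increases := by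
  intro depths window_size _ hpre
  unfold Spec_rolling_avg_increases
  exact pv_main depths window_size hpre
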